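-- pv_equiv track=rewrite | github.com/xiahutao/cl_trend | get_all_state_1.py | normal_b_s
-- ===== SOURCE A (Python) =====
-- import copy
--
-- def normal_b_s(lst):
--     b_s_lst = copy.deepcopy(lst)
--     if lst[0] == -1:
--         for i in range(len(lst)):
--             if b_s_lst[i] > -1:
--                 b_s_lst[:i] = [0] * i
--                 b_s_lst[i] = 1
--                 break
--     if lst[0] == 0:
--         b_s_lst[0] = 1
--     for j in range(1, len(b_s_lst)):
--         if b_s_lst[j] == 0:
--             b_s_lst[j] = -b_s_lst[j - 1]
--     b_s_lst_ = copy.deepcopy(b_s_lst)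
--     for m in range(1, len(b_s_lst_)):
--         if b_s_lst[m] * b_s_lst[m - 1] > 0:
--             b_s_lst_[m] = 0
--     for n in range(1, len(lst)):
--         if b_s_lst_[-n] == 1:
--             b_s_lst_[-n] = 0
--             break
--     return b_s_lst_
-- ===== SOURCE B (Python) =====
-- def normal_b_s(lst):
--     n = len(lst)
--     vals = list(lst)
--     if lst[0] == -1:
--         k = next((i for i, v in enumerate(vals) if v > -1), None)
--         if k is not None:
--             vals[:k] = [0] * k
--             vals[k] = 1
--     elif lst[0] == 0:
--         vals[0] = 1
--     prev = vals[0]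
--     out = [prev]
--     for v in vals[1:]:
--         cur = -prev if v == 0 else v
--         out.append(0 if cur * prev > 0 else cur)
--         prev = cur
--     for i in range(n - 1, 0, -1):
--         if out[i] == 1:
--             out[i] = 0
--             break
--     return out
-- ===== Notes on version B (the rewrite author's own statement) =====
-- stated objective: simpler
-- what changed: A's two middle forward passes (zero-fill pass, then a same-sign suppression pass over a second deep copy) are fused into one prev-carrying pass, removing the second copy; the leading normalization and the backward break-scan are kept.
-- outside the precondition, e.g. on normal_b_s([]): A raises IndexError, B raises IndexError
import Mathlib
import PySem

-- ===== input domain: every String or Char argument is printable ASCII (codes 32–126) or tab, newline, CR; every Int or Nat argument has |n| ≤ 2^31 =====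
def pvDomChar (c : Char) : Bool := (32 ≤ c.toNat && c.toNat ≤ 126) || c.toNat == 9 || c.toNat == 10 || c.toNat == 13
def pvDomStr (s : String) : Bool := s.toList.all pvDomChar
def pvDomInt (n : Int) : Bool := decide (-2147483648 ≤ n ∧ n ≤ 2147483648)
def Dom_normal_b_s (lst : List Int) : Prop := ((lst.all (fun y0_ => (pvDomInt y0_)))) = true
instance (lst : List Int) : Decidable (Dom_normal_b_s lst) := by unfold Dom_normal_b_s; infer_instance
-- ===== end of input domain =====

-- B fuses A's two middle forward passes (zero-fill and same-sign suppression) into one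
-- prev-carrying pass, dropping the second deepcopy; objective: simpler.

-- ===== PORT A =====
-- forward pass: for j in range(1, len): if b[j]==0: b[j] = -b[j-1]   (reads updated values)
def pvFwdA (prev : Int) : List Int → List Int
  | [] => []
  | v :: rest =>
    let cur := if v = 0 then -prev else v
    cur :: pvFwdA cur rest

-- suppression pass on the copy: b_[m] = 0 when b[m]*b[m-1] > 0 (reads the UNmodified b)
def pvSuppA (prev : Int) : List Int → List Int
  | [] => []
  | v :: rest => (if v * prev > 0 then 0 else v) :: pvSuppA v rest

-- backward pass over indices len-1 .. 1: zero the first value equal to 1, then break;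
-- rendered as a front scan of the reversed tail
def pvZf : List Int → List Int
  | [] => []
  | v :: rest => if v = 1 then 0 :: rest else v :: pvZf rest

def normal_b_s (lst : List Int) : List Int :=
  let b := lst
  let b := if lst.getD 0 0 = -1 then
      match b.findIdx? (fun v => decide (v > -1)) with  -- the break loop: first index with value > -1
      | some i => List.replicate i 0 ++ 1 :: b.drop (i + 1)
      | none => b
    else b
  let b := if lst.getD 0 0 = 0 then
      match b with | [] => [] | _ :: t => 1 :: t
    else b
  match b with
  | [] => []
  | h :: t =>
    let full := h :: pvFwdA h t
    match full with
    | [] => []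
    | h2 :: t2 =>
      let out := h2 :: pvSuppA h2 t2
      match out with
      | [] => []
      | h3 :: t3 => h3 :: (pvZf t3.reverse).reverse

-- ===== PORT B =====
-- single fused pass: cur = -prev if v==0 else v; emit 0 when cur*prev>0 else cur
def pvStepB (prev : Int) : List Int → List Int
  | [] => []
  | v :: rest =>
    let cur := if v = 0 then -prev else v
    (if cur * prev > 0 then 0 else cur) :: pvStepB cur rest

def normal_b_s_alt (lst : List Int) : List Int :=
  match lst with
  | [] => []
  | h :: t =>
    let vals : List Int :=
      if h = -1 then
        match (h :: t).findIdx? (fun v => decide (v > -1)) with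
        | some k => List.replicate k 0 ++ 1 :: (h :: t).drop (k + 1)
        | none => h :: t
      else if h = 0 then 1 :: t
      else h :: t
    match vals with
    | [] => []
    | p :: rest =>
      let out := p :: pvStepB p rest
      match out with
      | [] => []
      | o :: ot => o :: (pvZf ot.reverse).reverse

-- ===== PRECONDITION & SPEC =====
-- A indexes the first element; on the empty list it raises IndexError, so Pre_ excludes the empty list.
def Pre_normal_b_s (lst : List Int) : Prop := lst ≠ []
instance (lst : List Int) : Decidable (Pre_normal_b_s lst) := by unfold Pre_normal_b_s; infer_instance
def pvWitness_normal_b_s : List Int := ([-1, 0, 1, 0, -1])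

def Spec_normal_b_s (lst : List Int) (out : List Int) : Prop := out = normal_b_s_alt lst
instance (lst : List Int) (out : List Int) : Decidable (Spec_normal_b_s lst out) := by unfold Spec_normal_b_s; infer_instance

-- ===== CLAIM (what is proved, stated in full; the proofs are below) =====
def Claim_equal_normal_b_s : Prop := ∀ (lst : List Int), Dom_normal_b_s lst → Pre_normal_b_s lst → Spec_normal_b_s lst (normal_b_s lst)

-- ===== LEMMAS AND PROOFS =====

-- the fusion lemma: A's two middle passes compose to B's single pass
theorem suppA_fwdA (t : List Int) : ∀ p : Int, pvSuppA p (pvFwdA p t) = pvStepB p t := by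
  induction t with
  | nil => intro p; rfl
  | cons v rest ih =>
    intro p
    simp only [pvFwdA, pvSuppA, pvStepB, ih]

-- ===== VERDICT (by name: the statement is the Claim_ definition above) =====
theorem normal_b_s_spec : Claim_equal_normal_b_s := by
  intro lst _ hpre
  unfold Spec_normal_b_s
  match lst with
  | [] => exact absurd rfl hpre
  | h :: t =>
    unfold normal_b_s normal_b_s_alt
    simp only [List.getD_cons_zero]
    by_cases h1 : h = -1
    · have h0 : ¬ (h = 0) := by omega
      simp only [h1, if_neg (by omega : ¬ ((-1 : Int) = 0))]
      subst h1
      cases hf : ((-1 : Int) :: t).findIdx? (fun v => decide (v > -1)) with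
      | none => simp [suppA_fwdA]
      | some i =>
        cases hri : (List.replicate i (0 : Int) ++ 1 :: ((-1 : Int) :: t).drop (i + 1)) with
        | nil => simp at hri
        | cons p rest => simp [suppA_fwdA]
    · by_cases h0 : h = 0
      · subst h0
        simp only [if_neg h1]
        simp [suppA_fwdA]
      · simp [if_neg h1, if_neg h0, suppA_fwdA]
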